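-- pv_equiv track=rewrite | github.com/WouterLVV/TemporalGraphVisualization | tgv/io_operations.py | initialise_aggregation
-- ===== SOURCE A (Python) =====
-- def initialise_aggregation(pair_contacts, old_period, new_period):
--     old_timestamps = sorted(list(pair_contacts.keys()))
--     aggregate_pair_contacts = {}
--
--     # old: a contact was active in (t–old_period, t]
--     # new: a contact  is active in (t–new_period, t]
--
--     i = 0  # index in old timestamps
--     new_timestamp = old_timestamps[0] - old_period + new_period
--
--     while i < len(old_timestamps):
--         while i < len(old_timestamps) and old_timestamps[i] <= new_timestamp:
--             contacts = aggregate_pair_contacts.get(new_timestamp, [])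
--             contacts.extend(pair_contacts[old_timestamps[i]])
--             aggregate_pair_contacts[new_timestamp] = contacts
--             i += 1
--         new_timestamp += new_period
--
--     return aggregate_pair_contacts
-- ===== SOURCE B (Python) =====
-- def initialise_aggregation(pair_contacts, old_period, new_period):
--     # Bucket each timestamp directly by ceiling division instead of walking the
--     # new-period grid bucket by bucket.
--     base = min(pair_contacts) - old_period + new_period
--     aggregate_pair_contacts = {}
--     for t in sorted(pair_contacts):
--         steps = -((base - t) // new_period)
--         bucket = base + steps * new_period if steps > 0 else base
--         aggregate_pair_contacts.setdefault(bucket, []).extend(pair_contacts[t])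
--     return aggregate_pair_contacts
-- ===== Notes on version B (the rewrite author's own statement) =====
-- stated objective: alternative
-- what changed: Instead of A's merge-style double while-loop that advances the new-period grid one bucket at a time, B computes each timestamp's bucket directly with one ceiling division and groups into the dict in a single pass over the sorted timestamps.
-- outside the precondition, e.g. on initialise_aggregation({0: [1]}, 0, 0): A returns {0: [1]}, B raises ZeroDivisionError; on initialise_aggregation({5: [1]}, -2, -1): A returns {6: [1]}, B returns {5: [1]}
import Mathlib
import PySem

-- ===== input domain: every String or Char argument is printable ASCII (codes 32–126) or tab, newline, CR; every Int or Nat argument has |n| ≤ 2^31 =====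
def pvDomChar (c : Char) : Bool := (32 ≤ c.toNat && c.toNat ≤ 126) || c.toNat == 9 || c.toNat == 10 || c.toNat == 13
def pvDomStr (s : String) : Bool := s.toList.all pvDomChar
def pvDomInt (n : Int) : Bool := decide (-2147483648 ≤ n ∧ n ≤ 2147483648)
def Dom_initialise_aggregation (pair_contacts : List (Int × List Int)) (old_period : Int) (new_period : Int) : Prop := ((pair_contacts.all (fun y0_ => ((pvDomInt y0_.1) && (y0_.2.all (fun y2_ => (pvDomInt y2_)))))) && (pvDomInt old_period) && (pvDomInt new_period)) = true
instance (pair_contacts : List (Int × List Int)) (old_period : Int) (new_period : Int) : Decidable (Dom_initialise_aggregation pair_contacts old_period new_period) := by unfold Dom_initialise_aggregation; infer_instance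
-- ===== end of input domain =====

-- B replaces A's bucket-by-bucket walk over the new-period grid with a direct
-- ceiling-division bucket formula per timestamp (objective: alternative).


-- ===== PORT A =====
-- A's nested while-loops as one recursion: consume the head timestamp while it is
-- ≤ new_timestamp (inner while), otherwise bump new_timestamp by new_period (outer while).
-- The '0 < p' guard only makes the recursion total: Python A diverges there (Pre_ excludes it).
def initAggLoopA (d : PySem.Dict Int (List Int)) (ts : List Int) (nt p : Int)
    (agg : PySem.Dict Int (List Int)) : PySem.Dict Int (List Int) :=
  match ts with
  | [] => agg
  | t :: rest =>
    if t ≤ nt then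
      initAggLoopA d rest nt p (agg.insert nt (agg.getD nt [] ++ d.getD t []))
    else if 0 < p then initAggLoopA d (t :: rest) (nt + p) p agg
    else agg
termination_by (ts.length, (ts.headD 0 - nt).toNat)
decreasing_by
  · exact Prod.Lex.left _ _ (by simp)
  · exact Prod.Lex.right _ (by simp; omega)

def initialise_aggregation (pair_contacts : List (Int × List Int)) (old_period : Int) (new_period : Int) : List (Int × List Int) :=
  let pcd := PySem.Dict.ofList pair_contacts
  let old_timestamps := PySem.List.sorted pcd.keys (fun x => x)
  -- old_timestamps[0] raises IndexError on empty input; total form pyGetD, excluded by Pre_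
  let new_timestamp := PySem.List.pyGetD old_timestamps 0 0 - old_period + new_period
  (initAggLoopA pcd old_timestamps new_timestamp new_period PySem.Dict.empty).items

-- ===== PORT B =====
-- bucket = base + steps * new_period if steps > 0 else base, steps = -((base - t) // new_period)
def bucketB (base p t : Int) : Int :=
  let steps := -(PySem.Int.floordiv (base - t) p)
  if 0 < steps then base + steps * p else base

def initialise_aggregation_alt (pair_contacts : List (Int × List Int)) (old_period : Int) (new_period : Int) : List (Int × List Int) :=
  let pcd := PySem.Dict.ofList pair_contacts
  -- min(pair_contacts) raises ValueError on empty input; total form minD, excluded by Pre_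
  let base := PySem.List.minD pcd.keys (fun x => x) 0 - old_period + new_period
  ((PySem.List.sorted pcd.keys (fun x => x)).foldl
    (fun agg t => agg.modify (bucketB base new_period t) [] (· ++ pcd.getD t [])) PySem.Dict.empty).items

-- ===== PRECONDITION & SPEC =====
-- Pre_ excludes empty input, where A raises IndexError (B raises ValueError), and
-- non-positive new_period, on which A loops forever except in degenerate cases where every
-- timestamp falls into the very first bucket (B divides by new_period there: it raises
-- ZeroDivisionError for 0 and lays the grid out on the other side for negatives).
def Pre_initialise_aggregation (pair_contacts : List (Int × List Int)) (old_period : Int) (new_period : Int) : Prop :=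
  pair_contacts ≠ [] ∧ 0 < new_period
instance (pair_contacts : List (Int × List Int)) (old_period : Int) (new_period : Int) : Decidable (Pre_initialise_aggregation pair_contacts old_period new_period) := by unfold Pre_initialise_aggregation; infer_instance

def pvWitness_initialise_aggregation : (List (Int × List Int)) × Int × Int := ([(3, [1, 2]), (1, [5])], 2, 1)

def Spec_initialise_aggregation (pair_contacts : List (Int × List Int)) (old_period : Int) (new_period : Int) (out : List (Int × List Int)) : Prop := out = initialise_aggregation_alt pair_contacts old_period new_period
instance (pair_contacts : List (Int × List Int)) (old_period : Int) (new_period : Int) (out : List (Int × List Int)) : Decidable (Spec_initialise_aggregation pair_contacts old_period new_period out) := by unfold Spec_initialise_aggregation; infer_instance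

-- ===== CLAIM (what is proved, stated in full; the proofs are below) =====
def Claim_equal_initialise_aggregation : Prop := ∀ (pair_contacts : List (Int × List Int)) (old_period : Int) (new_period : Int), Dom_initialise_aggregation pair_contacts old_period new_period → Pre_initialise_aggregation pair_contacts old_period new_period → Spec_initialise_aggregation pair_contacts old_period new_period (initialise_aggregation pair_contacts old_period new_period)

-- ===== LEMMAS AND PROOFS =====

-- below the current grid point the bucket is the grid point itself
lemma bucketB_of_le {nt p t : Int} (hp : 0 < p) (h : t ≤ nt) : bucketB nt p t = nt := by
  have h0 : 0 ≤ (nt - t) / p := Int.ediv_nonneg (by omega) hp.le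
  simp only [bucketB, PySem.Int.floordiv_eq_ediv_of_pos hp]
  rw [if_neg (by omega)]

-- above the current grid point, advancing the grid by one step does not change the bucket
lemma bucketB_shift {nt p t : Int} (hp : 0 < p) (h : nt < t) : bucketB (nt + p) p t = bucketB nt p t := by
  have hq : (nt - t) / p < 0 := Int.ediv_neg_of_neg_of_pos (by omega) hp
  have hstep : (nt + p - t) / p = (nt - t) / p + 1 := by
    have := Int.add_mul_ediv_right (nt - t) 1 hp.ne'
    simpa [one_mul] using (by rw [show nt + p - t = nt - t + 1 * p by ring, this])
  simp only [bucketB, PySem.Int.floordiv_eq_ediv_of_pos hp, hstep]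
  set q := (nt - t) / p with hqdef
  split_ifs with h1 h2 h2
  · ring
  · omega
  · have : q = -1 := by omega
    rw [this]; ring
  · omega

-- A's grid walk over an ascending list is B's per-element bucketing fold
lemma initAggLoopA_eq (d : PySem.Dict Int (List Int)) (ts : List Int) (nt p : Int)
    (agg : PySem.Dict Int (List Int)) (hp : 0 < p) (hs : ts.Pairwise (· ≤ ·)) :
    initAggLoopA d ts nt p agg
      = ts.foldl (fun agg t => agg.insert (bucketB nt p t) (agg.getD (bucketB nt p t) [] ++ d.getD t [])) agg := by
  fun_induction initAggLoopA d ts nt p agg with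
  | case1 nt agg => simp
  | case2 nt agg t rest hle ih =>
    rw [List.foldl_cons, bucketB_of_le hp hle]
    exact ih (List.Pairwise.of_cons hs)
  | case3 nt agg t rest hgt hp' ih =>
    rw [ih hs]
    apply PySem.List.foldl_congr_mem
    intro acc x hx
    have hx' : nt < x := by
      rcases List.mem_cons.mp hx with rfl | hmem
      · omega
      · have := (List.pairwise_cons.mp hs).1 x hmem; omega
    rw [bucketB_shift hp hx']
  | case4 nt agg t rest hgt hnp => omega

-- the head of the sorted key list is min(keys)
lemma head_sorted_eq_minD (keys : List Int) {m : Int} {t : List Int}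
    (h : PySem.List.sorted keys (fun x => x) = m :: t) :
    m = PySem.List.minD keys (fun x => x) 0 := by
  have hne : keys ≠ [] := by
    intro hnil; rw [hnil] at h; simp [PySem.List.sorted] at h
  obtain ⟨m', hm'⟩ : ∃ m', PySem.List.min? keys (fun x => x) = some m' := by
    rcases hx : PySem.List.min? keys (fun x => x) with _ | m'
    · exact absurd ((PySem.List.min?_eq_none_iff keys (fun x => x)).mp hx) hne
    · exact ⟨m', rfl⟩
  have hmem : m ∈ keys := (PySem.List.mem_sorted keys (fun x => x) false m).mp (h ▸ List.mem_cons_self)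
  have h1 : m ≤ m' := PySem.List.key_head_sorted_le keys (fun x => x) h m' (PySem.List.min?_mem hm')
  have h2 : m' ≤ m := PySem.List.min?_isMin hm' m hmem
  simp [PySem.List.minD, hm']
  omega

-- ===== VERDICT (by name: the statement is the Claim_ definition above) =====
theorem initialise_aggregation_spec : Claim_equal_initialise_aggregation := by
  intro pc op np _hdom hpre
  unfold Spec_initialise_aggregation initialise_aggregation initialise_aggregation_alt
  simp only [PySem.Dict.modify]
  rcases h : PySem.List.sorted (PySem.Dict.ofList pc).keys (fun x => x) with _ | ⟨m, t⟩
  · simp [initAggLoopA]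
  · rw [initAggLoopA_eq _ _ _ _ _ hpre.2
      (by have := PySem.List.sorted_pairwise (PySem.Dict.ofList pc).keys (fun x => x); rw [h] at this; simpa using this)]
    rw [← head_sorted_eq_minD _ h]
    simp [PySem.List.pyGetD_zero_cons]
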